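-- pv_equiv track=rewrite | github.com/sweetdonaut/DRAEM | create_test_dataset.py | get_valid_positions
-- ===== SOURCE A (Python) =====
-- def get_valid_positions(img_size, patch_size, defect_centers, exclusion_size=256):
--     positions = []
--     step = patch_size
--
--     for y in range(0, img_size - patch_size + 1, step):
--         for x in range(0, img_size - patch_size + 1, step):
--             patch_cx, patch_cy = x + patch_size // 2, y + patch_size // 2
--
--             valid = True
--             for def_x, def_y in defect_centers:
--                 if (abs(patch_cx - def_x) < (exclusion_size + patch_size) // 2 and
--                     abs(patch_cy - def_y) < (exclusion_size + patch_size) // 2):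
--                     valid = False
--                     break
--
--             if valid:
--                 positions.append((x, y))
--
--     return positions
-- ===== SOURCE B (Python) =====
-- def get_valid_positions(img_size, patch_size, defect_centers, exclusion_size=256):
--     cells = list(range(0, img_size - patch_size + 1, patch_size))
--     half = patch_size // 2
--     thresh = (exclusion_size + patch_size) // 2
--     excluded = set()
--     for def_x, def_y in defect_centers:
--         for gx in cells:
--             if abs(gx + half - def_x) < thresh:
--                 for gy in cells:
--                     if abs(gy + half - def_y) < thresh:
--                         excluded.add((gx, gy))
--     return [(x, y) for y in cells for x in cells if (x, y) not in excluded]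
-- ===== Notes on version B (the rewrite author's own statement) =====
-- stated objective: alternative
-- what changed: Loops inverted: instead of scanning all defects for every grid cell, B first builds a set of excluded grid positions by iterating over the defects (scanning each grid axis once per defect, with the x-test hoisted outside the y-scan), then emits the grid in one filtered pass testing set membership.
import Mathlib
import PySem

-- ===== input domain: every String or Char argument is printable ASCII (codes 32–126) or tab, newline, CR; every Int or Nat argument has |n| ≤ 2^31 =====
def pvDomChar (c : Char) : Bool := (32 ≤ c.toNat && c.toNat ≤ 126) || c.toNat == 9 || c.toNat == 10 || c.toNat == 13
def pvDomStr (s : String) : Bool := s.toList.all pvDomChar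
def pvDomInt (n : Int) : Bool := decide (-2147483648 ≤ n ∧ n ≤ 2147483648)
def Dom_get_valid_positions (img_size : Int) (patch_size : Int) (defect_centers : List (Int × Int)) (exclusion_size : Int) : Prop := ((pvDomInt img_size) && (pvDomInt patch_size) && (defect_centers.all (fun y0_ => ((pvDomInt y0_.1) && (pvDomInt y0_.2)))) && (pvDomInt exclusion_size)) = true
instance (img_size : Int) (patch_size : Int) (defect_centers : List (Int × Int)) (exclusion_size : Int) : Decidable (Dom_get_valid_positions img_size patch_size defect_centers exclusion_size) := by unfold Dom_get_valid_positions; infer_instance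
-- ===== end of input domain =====

-- B inverts the loops: it builds a set of excluded grid positions from the defects first,
-- then emits the grid in one filtered pass (alternative decomposition; same result).

-- ===== PORT A =====
-- the inner 'for def_x, def_y in defect_centers: … break' loop of A
def pvCheckDefects (patch_cx patch_cy thresh : Int) : List (Int × Int) → Bool
  | [] => true
  | d :: rest =>
      if |patch_cx - d.1| < thresh ∧ |patch_cy - d.2| < thresh then false
      else pvCheckDefects patch_cx patch_cy thresh rest

def get_valid_positions (img_size : Int) (patch_size : Int) (defect_centers : List (Int × Int)) (exclusion_size : Int) : List (Int × Int) :=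
  let step := patch_size
  (PySem.List.pyRange 0 (img_size - patch_size + 1) step).foldl (fun positions y =>
    (PySem.List.pyRange 0 (img_size - patch_size + 1) step).foldl (fun positions x =>
      let patch_cx := x + PySem.Int.floordiv patch_size 2
      let patch_cy := y + PySem.Int.floordiv patch_size 2
      let valid := pvCheckDefects patch_cx patch_cy (PySem.Int.floordiv (exclusion_size + patch_size) 2) defect_centers
      if valid then positions ++ [(x, y)] else positions) positions) []

-- ===== PORT B =====
def get_valid_positions_alt (img_size : Int) (patch_size : Int) (defect_centers : List (Int × Int)) (exclusion_size : Int) : List (Int × Int) :=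
  let cells := PySem.List.pyRange 0 (img_size - patch_size + 1) patch_size
  let half := PySem.Int.floordiv patch_size 2
  let thresh := PySem.Int.floordiv (exclusion_size + patch_size) 2
  let excluded : PySem.Set (Int × Int) :=
    defect_centers.foldl (fun ex d =>
      cells.foldl (fun ex gx =>
        if |gx + half - d.1| < thresh then
          cells.foldl (fun ex gy =>
            if |gy + half - d.2| < thresh then PySem.Set.add ex (gx, gy) else ex) ex
        else ex) ex) PySem.Set.empty
  cells.flatMap (fun y =>
    (cells.filter (fun x => !(PySem.Set.contains excluded (x, y)))).map (fun x => (x, y)))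

-- ===== PRECONDITION & SPEC =====
-- Pre_ excludes exactly patch_size = 0, where range(0, …, 0) raises ValueError in both A and B.
def Pre_get_valid_positions (img_size : Int) (patch_size : Int) (defect_centers : List (Int × Int)) (exclusion_size : Int) : Prop := patch_size ≠ 0
instance (img_size : Int) (patch_size : Int) (defect_centers : List (Int × Int)) (exclusion_size : Int) : Decidable (Pre_get_valid_positions img_size patch_size defect_centers exclusion_size) := by unfold Pre_get_valid_positions; infer_instance
def pvWitness_get_valid_positions : Int × Int × (List (Int × Int)) × Int := (8, 4, [(2, 2)], 2)

def Spec_get_valid_positions (img_size : Int) (patch_size : Int) (defect_centers : List (Int × Int)) (exclusion_size : Int) (out : List (Int × Int)) : Prop := out = get_valid_positions_alt img_size patch_size defect_centers exclusion_size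
instance (img_size : Int) (patch_size : Int) (defect_centers : List (Int × Int)) (exclusion_size : Int) (out : List (Int × Int)) : Decidable (Spec_get_valid_positions img_size patch_size defect_centers exclusion_size out) := by unfold Spec_get_valid_positions; infer_instance

-- ===== CLAIM (what is proved, stated in full; the proofs are below) =====
def Claim_equal_get_valid_positions : Prop := ∀ (img_size : Int) (patch_size : Int) (defect_centers : List (Int × Int)) (exclusion_size : Int), Dom_get_valid_positions img_size patch_size defect_centers exclusion_size → Pre_get_valid_positions img_size patch_size defect_centers exclusion_size → Spec_get_valid_positions img_size patch_size defect_centers exclusion_size (get_valid_positions img_size patch_size defect_centers exclusion_size)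

-- ===== LEMMAS AND PROOFS =====

-- proof-only abbreviations for the pieces both ports share (definitionally equal to the ports' subterms)
def pvCells (img p : Int) : List Int := PySem.List.pyRange 0 (img - p + 1) p
def pvHalf (p : Int) : Int := PySem.Int.floordiv p 2
def pvThr (e p : Int) : Int := PySem.Int.floordiv (e + p) 2
def pvExcl (cells : List Int) (half thresh : Int) (ds : List (Int × Int)) : PySem.Set (Int × Int) :=
  ds.foldl (fun ex d =>
    cells.foldl (fun ex gx =>
      if |gx + half - d.1| < thresh then
        cells.foldl (fun ex gy =>
          if |gy + half - d.2| < thresh then PySem.Set.add ex (gx, gy) else ex) ex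
      else ex) ex) PySem.Set.empty

-- A's break loop is a negated 'any'
theorem pvCheckDefects_eq_not_any (cx cy t : Int) (ds : List (Int × Int)) :
    pvCheckDefects cx cy t ds = !ds.any (fun d => decide (|cx - d.1| < t ∧ |cy - d.2| < t)) := by
  induction ds with
  | nil => rfl
  | cons d rest ih =>
    by_cases h : |cx - d.1| < t ∧ |cy - d.2| < t
    · simp [pvCheckDefects, h]
    · simp only [pvCheckDefects, if_neg h, ih, List.any_cons, decide_eq_false h, Bool.false_or]

-- membership through a fold of conditional set-insertions, abstractly
theorem mem_foldl_of_mem_step {α β : Type} (F : PySem.Set β → α → PySem.Set β) (Q : α → β → Prop)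
    (hF : ∀ s a z, z ∈ F s a ↔ z ∈ s ∨ Q a z) :
    ∀ (l : List α) (s : PySem.Set β) (z : β), z ∈ l.foldl F s ↔ z ∈ s ∨ ∃ a ∈ l, Q a z := by
  intro l
  induction l with
  | nil => simp
  | cons a rest ih =>
    intro s z
    simp only [List.foldl_cons, ih, hF, List.mem_cons]
    constructor
    · rintro ((h | h) | ⟨b, hb, hq⟩)
      · exact Or.inl h
      · exact Or.inr ⟨a, Or.inl rfl, h⟩
      · exact Or.inr ⟨b, Or.inr hb, hq⟩
    · rintro (h | ⟨b, (rfl | hb), hq⟩)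
      · exact Or.inl (Or.inl h)
      · exact Or.inl (Or.inr hq)
      · exact Or.inr ⟨b, hb, hq⟩

theorem mem_set_addif {β α : Type} [BEq β] [LawfulBEq β] (p : α → Prop) [DecidablePred p]
    (f : α → β) (s : PySem.Set β) (a : α) (z : β) :
    z ∈ (if p a then PySem.Set.add s (f a) else s) ↔ z ∈ s ∨ (p a ∧ z = f a) := by
  by_cases h : p a
  · simp only [if_pos h, PySem.Set.mem_add]; tauto
  · simp [h]

-- what the excluded set of B contains
theorem mem_pvExcl (cells : List Int) (half thresh : Int) (ds : List (Int × Int)) (x y : Int) :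
    (x, y) ∈ pvExcl cells half thresh ds
    ↔ ∃ d ∈ ds, x ∈ cells ∧ y ∈ cells ∧ |x + half - d.1| < thresh ∧ |y + half - d.2| < thresh := by
  have hInner : ∀ (d : Int × Int) (gx : Int) (s : PySem.Set (Int × Int)) (z : Int × Int),
      z ∈ cells.foldl (fun ex gy =>
            if |gy + half - d.2| < thresh then PySem.Set.add ex (gx, gy) else ex) s
      ↔ z ∈ s ∨ ∃ gy ∈ cells, |gy + half - d.2| < thresh ∧ z = (gx, gy) := by
    intro d gx s z
    exact mem_foldl_of_mem_step _ (fun gy z => |gy + half - d.2| < thresh ∧ z = (gx, gy))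
      (fun s gy z => mem_set_addif (fun gy => |gy + half - d.2| < thresh) (fun gy => (gx, gy)) s gy z)
      cells s z
  have hMid : ∀ (d : Int × Int) (s : PySem.Set (Int × Int)) (z : Int × Int),
      z ∈ cells.foldl (fun ex gx =>
            if |gx + half - d.1| < thresh then
              cells.foldl (fun ex gy =>
                if |gy + half - d.2| < thresh then PySem.Set.add ex (gx, gy) else ex) ex
            else ex) s
      ↔ z ∈ s ∨ ∃ gx ∈ cells, |gx + half - d.1| < thresh ∧
            ∃ gy ∈ cells, |gy + half - d.2| < thresh ∧ z = (gx, gy) := by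
    intro d s z
    refine mem_foldl_of_mem_step _
      (fun gx z => |gx + half - d.1| < thresh ∧ ∃ gy ∈ cells, |gy + half - d.2| < thresh ∧ z = (gx, gy))
      (fun s gx z => ?_) cells s z
    by_cases h : |gx + half - d.1| < thresh
    · simp only [h, if_pos, hInner d gx s z]
      tauto
    · simp [h]
  have hOuter := mem_foldl_of_mem_step _
    (fun (d : Int × Int) (z : Int × Int) => ∃ gx ∈ cells, |gx + half - d.1| < thresh ∧
        ∃ gy ∈ cells, |gy + half - d.2| < thresh ∧ z = (gx, gy))
    (fun s d z => hMid d s z) ds PySem.Set.empty (x, y)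
  rw [pvExcl, hOuter]
  constructor
  · rintro (h | ⟨d, hd, gx, hgx, h1, gy, hgy, h2, heq⟩)
    · simp [PySem.Set.empty] at h
    · injection heq with e1 e2
      subst e1; subst e2
      exact ⟨d, hd, hgx, hgy, h1, h2⟩
  · rintro ⟨d, hd, hx, hy, h1, h2⟩
    exact Or.inr ⟨d, hd, x, hx, h1, y, hy, h2, rfl⟩

-- A flattened: the nested appending folds are one filtered grid pass
theorem A_flat (img p : Int) (ds : List (Int × Int)) (e : Int) :
    get_valid_positions img p ds e =
      (pvCells img p).flatMap (fun y =>
        ((pvCells img p).filter (fun x =>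
          pvCheckDefects (x + pvHalf p) (y + pvHalf p) (pvThr e p) ds)).map (fun x => (x, y))) := by
  show List.foldl (fun positions y =>
      List.foldl (fun positions x =>
        if pvCheckDefects (x + pvHalf p) (y + pvHalf p) (pvThr e p) ds = true
        then positions ++ [(x, y)] else positions) positions (pvCells img p)) [] (pvCells img p) = _
  have hstep : ∀ (acc : List (Int × Int)), ∀ yy ∈ pvCells img p,
      List.foldl (fun positions x =>
        if pvCheckDefects (x + pvHalf p) (yy + pvHalf p) (pvThr e p) ds = true
        then positions ++ [(x, yy)] else positions) acc (pvCells img p)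
      = acc ++ ((pvCells img p).filter (fun x =>
          pvCheckDefects (x + pvHalf p) (yy + pvHalf p) (pvThr e p) ds)).map (fun x => (x, yy)) :=
    fun acc yy _ => PySem.List.foldl_append_if _ _ _ _
  rw [PySem.List.foldl_congr_mem _ _ _ _ hstep, PySem.List.foldl_append_eq_flatMap, List.nil_append]

-- B is definitionally that same pass filtered by set membership
theorem B_flat (img p : Int) (ds : List (Int × Int)) (e : Int) :
    get_valid_positions_alt img p ds e =
      (pvCells img p).flatMap (fun y =>
        ((pvCells img p).filter (fun x =>
          !(PySem.Set.contains (pvExcl (pvCells img p) (pvHalf p) (pvThr e p) ds) (x, y)))).map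
          (fun x => (x, y))) := rfl

-- pointwise agreement of the two keep-tests on grid cells
theorem valid_eq (img p e : Int) (ds : List (Int × Int)) (x y : Int)
    (hx : x ∈ pvCells img p) (hy : y ∈ pvCells img p) :
    pvCheckDefects (x + pvHalf p) (y + pvHalf p) (pvThr e p) ds
      = !(PySem.Set.contains (pvExcl (pvCells img p) (pvHalf p) (pvThr e p) ds) (x, y)) := by
  rw [pvCheckDefects_eq_not_any]
  congr 1
  rw [Bool.eq_iff_iff, List.any_eq_true]
  have hc : PySem.Set.contains (pvExcl (pvCells img p) (pvHalf p) (pvThr e p) ds) (x, y) = true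
      ↔ (x, y) ∈ pvExcl (pvCells img p) (pvHalf p) (pvThr e p) ds := by
    simp [PySem.Set.contains]
  rw [hc, mem_pvExcl]
  constructor
  · rintro ⟨d, hd, hdec⟩
    have h := of_decide_eq_true hdec
    exact ⟨d, hd, hx, hy, h.1, h.2⟩
  · rintro ⟨d, hd, _, _, h1, h2⟩
    exact ⟨d, hd, decide_eq_true ⟨h1, h2⟩⟩

-- ===== VERDICT (by name: the statement is the Claim_ definition above) =====
theorem get_valid_positions_spec : Claim_equal_get_valid_positions := by
  intro img p ds e _ _
  unfold Spec_get_valid_positions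
  rw [A_flat, B_flat]
  refine List.flatMap_congr (fun y hy => ?_)
  congr 1
  refine List.filter_congr (fun x hx => ?_)
  exact valid_eq img p e ds x y hx hy
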